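-- pv_equiv track=rewrite | github.com/qdiaz/42_projects | expertSystem/list_queries.py | initQueries
-- ===== SOURCE A (Python) =====
-- def initQueries(line):
--     listQueries = [];
--     for i in range(1, len(line)):
--         if line[i].isspace() or line[i] == '#':
--             break
--         if line[i] < 'A' or line[i] > 'Z':
--             return None
--         else:
--             listQueries.append(line[i])
--     if not listQueries:
--         return None
--     else:
--         return listQueries
-- ===== SOURCE B (Python) =====
-- def initQueries(line):
--     rest = line[1:]
--     end = next((i for i, c in enumerate(rest) if c.isspace() or c == '#'), len(rest))
--     segment = rest[:end]
--     if segment and all('A' <= c <= 'Z' for c in segment):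
--         return list(segment)
--     return None
-- ===== Notes on version B (the rewrite author's own statement) =====
-- stated objective: simpler
-- what changed: B separates the pass that finds where the query ends (first whitespace/'#') from the all-uppercase validation and empty check, instead of A's single interleaved loop with break/early-return and an accumulator.
import Mathlib
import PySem

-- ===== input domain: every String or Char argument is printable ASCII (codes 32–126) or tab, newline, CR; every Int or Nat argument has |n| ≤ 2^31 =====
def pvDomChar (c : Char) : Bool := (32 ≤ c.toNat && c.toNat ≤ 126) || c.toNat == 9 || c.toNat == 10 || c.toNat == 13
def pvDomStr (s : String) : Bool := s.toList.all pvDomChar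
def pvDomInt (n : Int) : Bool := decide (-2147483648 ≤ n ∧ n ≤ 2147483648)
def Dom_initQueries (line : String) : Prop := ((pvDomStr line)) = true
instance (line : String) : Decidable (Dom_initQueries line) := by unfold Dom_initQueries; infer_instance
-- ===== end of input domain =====

-- B separates the end-of-query scan from the all-uppercase validation instead of A's single interleaved loop; equivalence is proved on all inputs.

-- ===== PORT A =====
-- A iterates i over range(1, len(line)), i.e. over the characters of line.toList.tail
-- in order, with accumulator listQueries; branch order kept.
def initQueriesLoopA : List Char → List String → Option (List String)
  | [], acc => if acc = [] then none else some acc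
  | c :: rest, acc =>
    if PySem.Chars.isspace c || c = '#' then
      -- break, then the trailing 'if not listQueries' check
      if acc = [] then none else some acc
    else if c < 'A' || 'Z' < c then
      none
    else
      initQueriesLoopA rest (acc ++ [String.mk [c]])

def initQueries (line : String) : Option (List String) :=
  initQueriesLoopA line.toList.tail []

-- ===== PORT B =====
def initQueries_alt (line : String) : Option (List String) :=
  let rest := line.toList.tail          -- line[1:]
  let e := rest.findIdx (fun c => PySem.Chars.isspace c || c = '#')  -- default len(rest) matches findIdx
  let segment := rest.take e
  if segment ≠ [] ∧ segment.all (fun c => 'A' ≤ c ∧ c ≤ 'Z') then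
    some (segment.map (fun c => String.mk [c]))
  else
    none

-- ===== PRECONDITION & SPEC =====
def Spec_initQueries (line : String) (out : Option (List String)) : Prop := out = initQueries_alt line
instance (line : String) (out : Option (List String)) : Decidable (Spec_initQueries line out) := by unfold Spec_initQueries; infer_instance

-- ===== CLAIM (what is proved, stated in full; the proofs are below) =====
def Claim_equal_initQueries : Prop := ∀ (line : String), Dom_initQueries line → Spec_initQueries line (initQueries line)

-- ===== LEMMAS AND PROOFS =====

def pvTerm (c : Char) : Bool := PySem.Chars.isspace c || c = '#'

lemma pv_take_findIdx (cs : List Char) :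
    cs.take (cs.findIdx pvTerm) = cs.takeWhile (fun c => !pvTerm c) := by
  induction cs with
  | nil => rfl
  | cons c rest ih =>
    by_cases h : pvTerm c = true <;>
      simp [List.findIdx_cons, List.takeWhile_cons, h, ih]

lemma pv_loopA_eq (cs : List Char) (acc : List String) :
    initQueriesLoopA cs acc =
      (if (cs.takeWhile (fun c => !pvTerm c)).all (fun c => decide ('A' ≤ c ∧ c ≤ 'Z')) then
        (if acc ++ (cs.takeWhile (fun c => !pvTerm c)).map (fun c => String.mk [c]) = [] then none
         else some (acc ++ (cs.takeWhile (fun c => !pvTerm c)).map (fun c => String.mk [c])))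
       else none) := by
  induction cs generalizing acc with
  | nil => simp [initQueriesLoopA]
  | cons c rest ih =>
    by_cases ht : pvTerm c = true
    · simp [initQueriesLoopA, List.takeWhile_cons, ht, pvTerm] at *
      rcases ht with h | h <;> simp [h]
    · have ht' : (PySem.Chars.isspace c || decide (c = '#')) = false := by
        simpa [pvTerm] using ht
      by_cases hv : ('A' ≤ c ∧ c ≤ 'Z')
      · have hlt : ¬ (c < 'A' ∨ 'Z' < c) := by
          rcases hv with ⟨h1, h2⟩
          push_neg
          exact ⟨h1, h2⟩
        simp [initQueriesLoopA, List.takeWhile_cons, ht', ht, hlt, hv, ih]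
      · have hlt : (c < 'A' ∨ 'Z' < c) := by
          by_contra h
          push_neg at h
          exact hv ⟨h.1, h.2⟩
        simp [initQueriesLoopA, List.takeWhile_cons, ht', ht, hlt, hv]

-- ===== VERDICT (by name: the statement is the Claim_ definition above) =====
theorem initQueries_spec : Claim_equal_initQueries := by
  intro line _
  show initQueriesLoopA line.toList.tail [] = initQueries_alt line
  unfold initQueries_alt
  rw [pv_loopA_eq]
  simp only [List.nil_append,
    show (fun c => PySem.Chars.isspace c || decide (c = '#')) = pvTerm from rfl,
    pv_take_findIdx]
  cases h : line.toList.tail.takeWhile (fun c => !pvTerm c) with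
  | nil => simp
  | cons x xs =>
    by_cases hall : ((x :: xs).all (fun c => decide ('A' ≤ c ∧ c ≤ 'Z'))) = true
    · simp [hall]
    · simp [hall]
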